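-- pv_equiv track=rewrite | github.com/hasanberkay4/CS301-Algorithms-Assignments | Assignment 4/algorithm_dp.py | findAPath
-- ===== SOURCE A (Python) =====
-- def findAPath(f, w, r, c):
--   currR = r - 1
--   currC = c - 1
--
--   path = []
--   while currR > 0 and currC > 0:
--     path.append([currC + 1, currR + 1])
--     if f[currR-1][currC] >= f[currR][currC-1]:
--       currR = currR - 1
--     elif f[currR-1][currC] < f[currR][currC-1]:
--       currC = currC - 1
--
--   while currC >= 1:
--     path.append([currC + 1, currR + 1])
--     currC = currC - 1
--
--   while currR >= 1:
--     path.append([currC + 1, currR + 1])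
--     currR = currR - 1
--
--   path.append([currC + 1, currR + 1])
--
--
--   pathStr = ""
--
--   for i in reversed(path):
--     pathStr += '(' + str(i[1]) + ',' + str(i[0]) + ') -> '
--
--   return pathStr
-- ===== SOURCE B (Python) =====
-- def findAPath(f, w, r, c):
--     # Recursive reconstruction: recurse into the chosen predecessor while both
--     # coordinates are positive and emit each cell's text AFTER the recursive
--     # call (origin-first order from the call stack); once the walk hits an
--     # edge the rest of the path is a straight segment, written in closed form.
--     def fmt(cr, cc):
--         return "({},{}) -> ".format(cr + 1, cc + 1)
--
--     def walk(cr, cc):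
--         if cr > 0 and cc > 0:
--             if f[cr - 1][cc] >= f[cr][cc - 1]:
--                 out = walk(cr - 1, cc)
--             else:
--                 out = walk(cr, cc - 1)
--             out.append(fmt(cr, cc))
--             return out
--         if cc >= 1:
--             return [fmt(cr, j) for j in range(cc + 1)]
--         if cr >= 1:
--             return [fmt(i, cc) for i in range(cr + 1)]
--         return [fmt(cr, cc)]
--
--     return "".join(walk(r - 1, c - 1))
-- ===== Notes on version B (the rewrite author's own statement) =====
-- stated objective: alternative
-- what changed: A's three while-loops building a path list that is then reversed and string-concatenated become a recursive walk that emits each cell's text after the recursive call (origin-first order from the call stack), with the straight tail segments after the staircase written as closed-form range comprehensions; Pre_ excludes grids too small (or ragged) to guarantee the backtracking's f[...][...] reads are in range, where A can raise IndexError.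
-- outside the precondition, e.g. on findAPath([[1, 2]], [], 2, 2): A raises IndexError, B raises IndexError
import Mathlib
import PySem

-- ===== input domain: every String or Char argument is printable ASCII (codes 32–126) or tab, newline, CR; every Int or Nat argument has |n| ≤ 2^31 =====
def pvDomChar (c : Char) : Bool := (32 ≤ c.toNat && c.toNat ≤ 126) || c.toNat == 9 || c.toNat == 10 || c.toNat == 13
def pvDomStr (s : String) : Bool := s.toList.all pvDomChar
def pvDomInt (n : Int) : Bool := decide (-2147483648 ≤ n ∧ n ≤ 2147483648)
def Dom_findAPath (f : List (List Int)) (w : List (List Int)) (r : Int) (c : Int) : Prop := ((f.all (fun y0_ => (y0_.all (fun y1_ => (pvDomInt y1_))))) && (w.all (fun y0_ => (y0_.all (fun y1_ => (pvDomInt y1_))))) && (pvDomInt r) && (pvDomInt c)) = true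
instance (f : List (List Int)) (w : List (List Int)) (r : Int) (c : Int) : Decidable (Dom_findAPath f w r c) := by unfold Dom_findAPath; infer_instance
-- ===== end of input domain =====

-- B replaces A's three while-loops + path list + reversal + concatenation by a
-- recursive walk that emits each cell's text after the recursive call (origin-first
-- order from the call stack), with the straight tail segments written in closed form;
-- same asymptotic cost.

-- ===== PORT A =====
-- A's path cells [currC+1, currR+1] are ported as pairs (col, row).
def fmtA (p : Int × Int) : List Char :=
  ['('] ++ PySem.Int.toChars p.2 ++ [','] ++ PySem.Int.toChars p.1 ++ [')', ' ', '-', '>', ' ']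

-- first while loop: both coordinates positive (out-of-range grid reads raise in Python; excluded by Pre_)
def phaseA1 (f : List (List Int)) : Nat → Int → Int → List (Int × Int) → Int × Int × List (Int × Int)
  | 0, cr, cc, path => (cr, cc, path)
  | fuel + 1, cr, cc, path =>
    if 0 < cr ∧ 0 < cc then
      let path' := path ++ [(cc + 1, cr + 1)]
      if PySem.List.pyGetD (PySem.List.pyGetD f (cr - 1) []) cc 0 ≥
         PySem.List.pyGetD (PySem.List.pyGetD f cr []) (cc - 1) 0 then
        phaseA1 f fuel (cr - 1) cc path'
      else
        phaseA1 f fuel cr (cc - 1) path'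
    else (cr, cc, path)

-- second while loop: walk the column down to 0
def phaseA2 : Nat → Int → Int → List (Int × Int) → Int × List (Int × Int)
  | 0, _, cc, path => (cc, path)
  | fuel + 1, cr, cc, path =>
    if 1 ≤ cc then phaseA2 fuel cr (cc - 1) (path ++ [(cc + 1, cr + 1)]) else (cc, path)

-- third while loop: walk the row down to 0
def phaseA3 : Nat → Int → Int → List (Int × Int) → Int × List (Int × Int)
  | 0, cr, _, path => (cr, path)
  | fuel + 1, cr, cc, path =>
    if 1 ≤ cr then phaseA3 fuel (cr - 1) cc (path ++ [(cc + 1, cr + 1)]) else (cr, path)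

def findAPath (f : List (List Int)) (w : List (List Int)) (r : Int) (c : Int) : String :=
  let s1 := phaseA1 f ((r - 1) + (c - 1)).toNat (r - 1) (c - 1) []
  let s2 := phaseA2 s1.2.1.toNat s1.1 s1.2.1 s1.2.2
  let s3 := phaseA3 s1.1.toNat s1.1 s2.1 s2.2
  let path := s3.2 ++ [(s2.1 + 1, s3.1 + 1)]
  String.ofList (path.reverse.foldl (fun acc i => acc ++ fmtA i) [])

-- ===== PORT B =====
def fmtB (cr cc : Int) : List Char :=
  ['('] ++ PySem.Int.toChars (cr + 1) ++ [','] ++ PySem.Int.toChars (cc + 1) ++ [')', ' ', '-', '>', ' ']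

-- B's recursive walk; each cell's text is appended AFTER the recursive call,
-- and the straight tail segments are written in closed form (range maps)
def walkB (f : List (List Int)) (cr cc : Int) : List (List Char) :=
  if 0 < cr ∧ 0 < cc then
    (if PySem.List.pyGetD (PySem.List.pyGetD f (cr - 1) []) cc 0 ≥
        PySem.List.pyGetD (PySem.List.pyGetD f cr []) (cc - 1) 0 then
      walkB f (cr - 1) cc
    else
      walkB f cr (cc - 1)) ++ [fmtB cr cc]
  else if 1 ≤ cc then (PySem.List.pyRange 0 (cc + 1) 1).map (fun j => fmtB cr j)
  else if 1 ≤ cr then (PySem.List.pyRange 0 (cr + 1) 1).map (fun i => fmtB i cc)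
  else [fmtB cr cc]
termination_by (cr.toNat + cc.toNat)
decreasing_by all_goals omega

def findAPath_alt (f : List (List Int)) (w : List (List Int)) (r : Int) (c : Int) : String :=
  String.ofList (PySem.Chars.join [] (walkB f (r - 1) (c - 1)))

-- ===== PRECONDITION & SPEC =====
-- Pre_ excludes exactly the inputs where Python A's grid reads f[...][...] can go out of
-- range and raise IndexError: when r ≥ 2 and c ≥ 2 the backtracking touches the grid, so
-- f must have at least r rows whose first r rows each have at least c entries (a mild
-- sufficient shape condition; ragged grids the data-dependent path happens to avoid are
-- also excluded).
def Pre_findAPath (f : List (List Int)) (w : List (List Int)) (r : Int) (c : Int) : Prop :=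
  2 ≤ r → 2 ≤ c → (r ≤ (f.length : Int) ∧ ∀ row ∈ f.take r.toNat, c ≤ (row.length : Int))
instance (f : List (List Int)) (w : List (List Int)) (r : Int) (c : Int) : Decidable (Pre_findAPath f w r c) := by unfold Pre_findAPath; infer_instance

def pvWitness_findAPath : List (List Int) × List (List Int) × Int × Int :=
  ([[1, 2], [3, 4]], [], 2, 2)

def Spec_findAPath (f : List (List Int)) (w : List (List Int)) (r : Int) (c : Int) (out : String) : Prop := out = findAPath_alt f w r c
instance (f : List (List Int)) (w : List (List Int)) (r : Int) (c : Int) (out : String) : Decidable (Spec_findAPath f w r c out) := by unfold Spec_findAPath; infer_instance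

-- ===== CLAIM (what is proved, stated in full; the proofs are below) =====
def Claim_equal_findAPath : Prop := ∀ (f : List (List Int)) (w : List (List Int)) (r : Int) (c : Int), Dom_findAPath f w r c → Pre_findAPath f w r c → Spec_findAPath f w r c (findAPath f w r c)

-- ===== LEMMAS AND PROOFS =====

-- the cells of the backtracking walk, in visited order, stored A-style as (col+1, row+1);
-- proof-only helper both ports' strings are related to
def cellsOf (f : List (List Int)) (cr cc : Int) : List (Int × Int) :=
  if 0 < cr ∧ 0 < cc then
    (cc + 1, cr + 1) ::
      (if PySem.List.pyGetD (PySem.List.pyGetD f (cr - 1) []) cc 0 ≥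
          PySem.List.pyGetD (PySem.List.pyGetD f cr []) (cc - 1) 0 then
        cellsOf f (cr - 1) cc
      else
        cellsOf f cr (cc - 1))
  else if 1 ≤ cc then (cc + 1, cr + 1) :: cellsOf f cr (cc - 1)
  else if 1 ≤ cr then (cc + 1, cr + 1) :: cellsOf f (cr - 1) cc
  else [(cc + 1, cr + 1)]
termination_by (cr.toNat + cc.toNat)
decreasing_by all_goals omega

theorem join_nil_flatten (parts : List (List Char)) :
    PySem.Chars.join [] parts = parts.flatten := by
  induction parts with
  | nil => simp [PySem.Chars.join, List.intercalate]
  | cons h t ih => cases t <;> simp_all [PySem.Chars.join, List.intercalate, List.intersperse]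

-- a straight column segment of the walk, as a reversed range
theorem cellsOf_col (f : List (List Int)) (cr : Int) (hcr : cr ≤ 0) :
    ∀ cc : Int, 0 ≤ cc →
      cellsOf f cr cc = ((PySem.List.pyRange 0 (cc + 1) 1).map (fun j => (j + 1, cr + 1))).reverse := by
  intro cc
  generalize hn : cc.toNat = n
  induction n generalizing cc with
  | zero =>
    intro h0
    have hcc : cc = 0 := by omega
    subst hcc
    rw [cellsOf, if_neg (by rintro ⟨h1, _⟩; omega), if_neg (by omega),
      if_neg (by omega), PySem.List.pyRange_one_singleton]
    simp
  | succ n ih =>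
    intro h0
    have hcc : 1 ≤ cc := by omega
    rw [cellsOf, if_neg (by rintro ⟨h1, _⟩; omega), if_pos hcc,
      ih (cc - 1) (by omega) (by omega),
      show (cc + 1 : Int) = (cc) + 1 from rfl,
      PySem.List.pyRange_one_succ_right (by omega : (0:Int) ≤ cc),
      show (cc - 1 + 1 : Int) = cc from by ring]
    simp

-- a straight row segment of the walk, as a reversed range
theorem cellsOf_row (f : List (List Int)) (cc : Int) (hcc : cc ≤ 0) :
    ∀ cr : Int, 0 ≤ cr →
      cellsOf f cr cc = ((PySem.List.pyRange 0 (cr + 1) 1).map (fun i => (cc + 1, i + 1))).reverse := by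
  intro cr
  generalize hn : cr.toNat = n
  induction n generalizing cr with
  | zero =>
    intro h0
    have hcr : cr = 0 := by omega
    subst hcr
    rw [cellsOf, if_neg (by rintro ⟨_, h2⟩; omega), if_neg (by omega),
      if_neg (by omega), PySem.List.pyRange_one_singleton]
    simp
  | succ n ih =>
    intro h0
    have hcr : 1 ≤ cr := by omega
    rw [cellsOf, if_neg (by rintro ⟨_, h2⟩; omega), if_neg (by omega), if_pos hcr,
      ih (cr - 1) (by omega) (by omega),
      PySem.List.pyRange_one_succ_right (by omega : (0:Int) ≤ cr),
      show (cr - 1 + 1 : Int) = cr from by ring]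
    simp

-- B's walk produces exactly the reversed cell list, formatted
theorem walkB_eq (f : List (List Int)) (cr cc : Int) :
    walkB f cr cc = (cellsOf f cr cc).reverse.map fmtA := by
  generalize hn : cr.toNat + cc.toNat = n
  induction n using Nat.strong_induction_on generalizing cr cc with
  | _ n ih =>
    rw [walkB]
    split_ifs with h hc hcc hr
    · rw [cellsOf, if_pos h, if_pos hc, ih ((cr - 1).toNat + cc.toNat) (by omega) (cr - 1) cc rfl]
      simp [fmtB, fmtA]
    · rw [cellsOf, if_pos h, if_neg hc, ih (cr.toNat + (cc - 1).toNat) (by omega) cr (cc - 1) rfl]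
      simp [fmtB, fmtA]
    · rw [cellsOf_col f cr (by omega) cc (by omega)]
      simp [fmtB, fmtA]
    · rw [cellsOf_row f cc (by omega) cr (by omega)]
      simp [fmtB, fmtA]
    · rw [cellsOf, if_neg h, if_neg hcc, if_neg hr]
      simp [fmtB, fmtA]

-- accumulator lemmas: each of A's loops only appends to its path argument
theorem phaseA1_acc (f : List (List Int)) (fuel : Nat) :
    ∀ (cr cc : Int) (s : List (Int × Int)),
      phaseA1 f fuel cr cc s =
        ((phaseA1 f fuel cr cc []).1, (phaseA1 f fuel cr cc []).2.1,
         s ++ (phaseA1 f fuel cr cc []).2.2) := by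
  induction fuel with
  | zero => intro cr cc s; simp [phaseA1]
  | succ fuel ih =>
    intro cr cc s
    rw [phaseA1, phaseA1]
    by_cases h : 0 < cr ∧ 0 < cc
    · rw [if_pos h, if_pos h]
      by_cases hc : PySem.List.pyGetD (PySem.List.pyGetD f (cr - 1) []) cc 0 ≥
         PySem.List.pyGetD (PySem.List.pyGetD f cr []) (cc - 1) 0
      · rw [if_pos hc, if_pos hc, ih (cr - 1) cc (s ++ [(cc + 1, cr + 1)]),
          ih (cr - 1) cc ([] ++ [(cc + 1, cr + 1)])]
        simp
      · rw [if_neg hc, if_neg hc, ih cr (cc - 1) (s ++ [(cc + 1, cr + 1)]),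
          ih cr (cc - 1) ([] ++ [(cc + 1, cr + 1)])]
        simp
    · rw [if_neg h, if_neg h]; simp

theorem phaseA2_acc (fuel : Nat) :
    ∀ (cr cc : Int) (s : List (Int × Int)),
      phaseA2 fuel cr cc s = ((phaseA2 fuel cr cc []).1, s ++ (phaseA2 fuel cr cc []).2) := by
  induction fuel with
  | zero => intro cr cc s; simp [phaseA2]
  | succ fuel ih =>
    intro cr cc s
    rw [phaseA2, phaseA2]
    by_cases h : 1 ≤ cc
    · rw [if_pos h, if_pos h, ih cr (cc - 1) (s ++ [(cc + 1, cr + 1)]),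
        ih cr (cc - 1) ([] ++ [(cc + 1, cr + 1)])]
      simp
    · rw [if_neg h, if_neg h]; simp

theorem phaseA3_acc (fuel : Nat) :
    ∀ (cr cc : Int) (s : List (Int × Int)),
      phaseA3 fuel cr cc s = ((phaseA3 fuel cr cc []).1, s ++ (phaseA3 fuel cr cc []).2) := by
  induction fuel with
  | zero => intro cr cc s; simp [phaseA3]
  | succ fuel ih =>
    intro cr cc s
    rw [phaseA3, phaseA3]
    by_cases h : 1 ≤ cr
    · rw [if_pos h, if_pos h, ih (cr - 1) cc (s ++ [(cc + 1, cr + 1)]),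
        ih (cr - 1) cc ([] ++ [(cc + 1, cr + 1)])]
      simp
    · rw [if_neg h, if_neg h]; simp

-- A's first loop consumes a prefix of cellsOf and stops with some coordinate ≤ 0
theorem phaseA1_cells (f : List (List Int)) (fuel : Nat) :
    ∀ (cr cc : Int), (0 < cr → 0 < cc → cr.toNat + cc.toNat ≤ fuel + 1) →
      cellsOf f cr cc =
        (phaseA1 f fuel cr cc []).2.2 ++
          cellsOf f (phaseA1 f fuel cr cc []).1 (phaseA1 f fuel cr cc []).2.1 ∧
        ¬(0 < (phaseA1 f fuel cr cc []).1 ∧ 0 < (phaseA1 f fuel cr cc []).2.1) := by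
  induction fuel with
  | zero =>
    intro cr cc hf
    have h : ¬(0 < cr ∧ 0 < cc) := by rintro ⟨h1, h2⟩; have := hf h1 h2; omega
    rw [phaseA1]; exact ⟨by simp, by simpa using h⟩
  | succ fuel ih =>
    intro cr cc hf
    rw [phaseA1]
    by_cases h : 0 < cr ∧ 0 < cc
    · rw [if_pos h]
      by_cases hc : PySem.List.pyGetD (PySem.List.pyGetD f (cr - 1) []) cc 0 ≥
         PySem.List.pyGetD (PySem.List.pyGetD f cr []) (cc - 1) 0
      · rw [if_pos hc, phaseA1_acc f fuel (cr - 1) cc ([] ++ [(cc + 1, cr + 1)])]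
        have := ih (cr - 1) cc (by intro h1 h2; have := hf h.1 h.2; omega)
        refine ⟨?_, by simpa using this.2⟩
        rw [cellsOf, if_pos h, if_pos hc, this.1]; simp
      · rw [if_neg hc, phaseA1_acc f fuel cr (cc - 1) ([] ++ [(cc + 1, cr + 1)])]
        have := ih cr (cc - 1) (by intro h1 h2; have := hf h.1 h.2; omega)
        refine ⟨?_, by simpa using this.2⟩
        rw [cellsOf, if_pos h, if_neg hc, this.1]; simp
    · rw [if_neg h]; simpa using h

-- A's second loop consumes the column cells; afterwards the column coordinate is ≤ 0
theorem phaseA2_cells (f : List (List Int)) (fuel : Nat) :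
    ∀ (cr cc : Int), cc.toNat ≤ fuel → ¬(0 < cr ∧ 0 < cc) →
      cellsOf f cr cc = (phaseA2 fuel cr cc []).2 ++ cellsOf f cr (phaseA2 fuel cr cc []).1 ∧
        (phaseA2 fuel cr cc []).1 ≤ 0 := by
  induction fuel with
  | zero =>
    intro cr cc hf _
    rw [phaseA2]; constructor
    · simp
    · simp; omega
  | succ fuel ih =>
    intro cr cc hf h
    rw [phaseA2]
    by_cases hc : 1 ≤ cc
    · have hcr : ¬ 0 < cr := fun h1 => h ⟨h1, by omega⟩
      rw [if_pos hc, phaseA2_acc fuel cr (cc - 1) ([] ++ [(cc + 1, cr + 1)])]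
      have := ih cr (cc - 1) (by omega) (by rintro ⟨h1, _⟩; exact hcr h1)
      refine ⟨?_, by simpa using this.2⟩
      rw [cellsOf, if_neg h, if_pos hc, this.1]; simp
    · rw [if_neg hc]; constructor
      · simp
      · simp; omega

-- A's third loop consumes the row cells; afterwards the row coordinate is ≤ 0
theorem phaseA3_cells (f : List (List Int)) (fuel : Nat) :
    ∀ (cr cc : Int), cr.toNat ≤ fuel → cc ≤ 0 →
      cellsOf f cr cc = (phaseA3 fuel cr cc []).2 ++ cellsOf f (phaseA3 fuel cr cc []).1 cc ∧
        (phaseA3 fuel cr cc []).1 ≤ 0 := by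
  induction fuel with
  | zero =>
    intro cr cc hf _
    rw [phaseA3]; constructor
    · simp
    · simp; omega
  | succ fuel ih =>
    intro cr cc hf hcc
    rw [phaseA3]
    by_cases hr : 1 ≤ cr
    · rw [if_pos hr, phaseA3_acc fuel (cr - 1) cc ([] ++ [(cc + 1, cr + 1)])]
      have := ih (cr - 1) cc (by omega) hcc
      refine ⟨?_, by simpa using this.2⟩
      rw [cellsOf, if_neg (by rintro ⟨_, h2⟩; omega), if_neg (by omega), if_pos hr, this.1]
      simp
    · rw [if_neg hr]; constructor
      · simp
      · simp; omega

-- both coordinates ≤ 0: the walk is just the final cell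
theorem cellsOf_done (f : List (List Int)) (cr cc : Int) (h1 : cr ≤ 0) (h2 : cc ≤ 0) :
    cellsOf f cr cc = [(cc + 1, cr + 1)] := by
  rw [cellsOf, if_neg (by rintro ⟨ha, _⟩; omega), if_neg (by omega), if_neg (by omega)]

-- ===== VERDICT (by name: the statement is the Claim_ definition above) =====
theorem findAPath_spec : Claim_equal_findAPath := by
  intro f w r c _ _
  unfold Spec_findAPath
  have h1 := phaseA1_cells f ((r - 1) + (c - 1)).toNat (r - 1) (c - 1)
    (by intro ha hb; omega)
  set s1 := phaseA1 f ((r - 1) + (c - 1)).toNat (r - 1) (c - 1) [] with hs1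
  have h2 := phaseA2_cells f s1.2.1.toNat s1.1 s1.2.1 le_rfl h1.2
  set s2 := phaseA2 s1.2.1.toNat s1.1 s1.2.1 [] with hs2
  have h3 := phaseA3_cells f s1.1.toNat s1.1 s2.1 le_rfl h2.2
  set s3 := phaseA3 s1.1.toNat s1.1 s2.1 [] with hs3
  have hfull : cellsOf f (r - 1) (c - 1) =
      s1.2.2 ++ s2.2 ++ s3.2 ++ [(s2.1 + 1, s3.1 + 1)] := by
    rw [h1.1, h2.1, h3.1, cellsOf_done f s3.1 s2.1 h3.2 h2.2]
    simp
  show findAPath f w r c = findAPath_alt f w r c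
  rw [findAPath, findAPath_alt, walkB_eq, join_nil_flatten]
  rw [phaseA2_acc s1.2.1.toNat s1.1 s1.2.1 s1.2.2]
  rw [phaseA3_acc s1.1.toNat s1.1 s2.1 (s1.2.2 ++ s2.2)]
  simp only [PySem.List.foldl_append_eq_flatMap]
  rw [hfull]
  simp only [← List.flatMap_def]
  simp only [← hs2, ← hs3]
  simp
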